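-- pv_equiv track=rewrite | github.com/kurawlefaraaz/PassGen | main.py | custom_password
-- ===== SOURCE A (Python) =====
-- def custom_password(password):
--     words_replace = (
--         ("s", "$"),
--         ("S", "$"),
--         ("and", "&"),
--         ("a", "@"),
--         ("A", "@"),
--         ("o", "0"),
--         ("O", "0"),
--         (" ", "_"),
--     )
--
--     for a, b in words_replace:
--         password = password.replace(a, b)
--
--     return password
-- ===== SOURCE B (Python) =====
-- def custom_password(password):
--     table = {"s": "$", "S": "$", "a": "@", "A": "@", "o": "0", "O": "0", " ": "_"}
--     out = []
--     i = 0
--     n = len(password)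
--     while i < n:
--         if password[i:i + 3] == "and":
--             out.append("&")
--             i += 3
--         else:
--             c = password[i]
--             out.append(table.get(c, c))
--             i += 1
--     return "".join(out)
-- ===== Notes on version B (the rewrite author's own statement) =====
-- stated objective: alternative
-- what changed: Replaced A's eight sequential full-string str.replace passes by a single left-to-right scan with a three-character lookahead for the word substitution and a per-character translation table.
import Mathlib
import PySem

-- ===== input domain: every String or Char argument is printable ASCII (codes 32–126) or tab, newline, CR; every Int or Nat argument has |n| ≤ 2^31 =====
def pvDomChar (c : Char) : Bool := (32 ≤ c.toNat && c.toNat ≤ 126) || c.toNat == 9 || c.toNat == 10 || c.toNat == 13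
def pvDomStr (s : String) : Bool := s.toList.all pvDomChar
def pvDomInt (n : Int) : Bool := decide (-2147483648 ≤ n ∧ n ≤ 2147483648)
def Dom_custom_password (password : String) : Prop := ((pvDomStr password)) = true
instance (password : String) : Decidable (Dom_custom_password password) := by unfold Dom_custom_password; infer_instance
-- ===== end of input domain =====

-- B replaces A's eight sequential str.replace passes by ONE left-to-right scan with a
-- 3-char lookahead for "and" and a per-char translation table (objective: alternative,
-- single pass over the string instead of eight).

-- ===== PORT A =====
def custom_password (password : String) : String :=
  -- the tuple of replacements is applied in order, exactly as A's loop does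
  let p := PySem.Str.replace password "s" "$"
  let p := PySem.Str.replace p "S" "$"
  let p := PySem.Str.replace p "and" "&"
  let p := PySem.Str.replace p "a" "@"
  let p := PySem.Str.replace p "A" "@"
  let p := PySem.Str.replace p "o" "0"
  let p := PySem.Str.replace p "O" "0"
  let p := PySem.Str.replace p " " "_"
  p

-- ===== PORT B =====
def cpTable : PySem.Dict Char Char :=
  PySem.Dict.ofList [('s','$'), ('S','$'), ('a','@'), ('A','@'), ('o','0'), ('O','0'), (' ','_')]

-- B's while loop over the index i is ported as recursion on the remaining suffix
-- (exact: password[i:i+3] == "and" is `take 3 = ['a','n','d']` on the suffix).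
def cpScan : List Char → List Char
  | [] => []
  | c :: t =>
    if (c :: t).take 3 = ['a', 'n', 'd'] then '&' :: cpScan ((c :: t).drop 3)
    else cpTable.getD c c :: cpScan t
termination_by l => l.length
decreasing_by
  all_goals simp; try omega

def custom_password_alt (password : String) : String :=
  String.ofList (cpScan password.toList)

-- ===== PRECONDITION & SPEC =====
def Spec_custom_password (password : String) (out : String) : Prop := out = custom_password_alt password
instance (password : String) (out : String) : Decidable (Spec_custom_password password out) := by unfold Spec_custom_password; infer_instance

-- ===== CLAIM (what is proved, stated in full; the proofs are below) =====
def Claim_equal_custom_password : Prop := ∀ (password : String), Dom_custom_password password → Spec_custom_password password (custom_password password)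

-- ===== LEMMAS AND PROOFS =====

-- single-character substitutions, as functions
def gS (c : Char) : Char := if c = 's' then '$' else if c = 'S' then '$' else c
def gRest (c : Char) : Char :=
  if c = 'a' then '@' else if c = 'A' then '@' else
  if c = 'o' then '0' else if c = 'O' then '0' else
  if c = ' ' then '_' else c

-- the "and" → "&" replacement as a recursion
def repAnd : List Char → List Char
  | [] => []
  | c :: t =>
    if (c :: t).take 3 = ['a', 'n', 'd'] then '&' :: repAnd (t.drop 2)
    else c :: repAnd t
termination_by l => l.length
decreasing_by
  all_goals simp; try omega

lemma go_single (c d : Char) : ∀ (fuel : Nat) (l acc : List Char), l.length ≤ fuel →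
    PySem.Chars.replace.go [c] [d] fuel l acc
      = acc.reverse ++ l.map (fun x => if x = c then d else x) := by
  intro fuel
  induction fuel with
  | zero =>
    intro l acc h
    have : l = [] := by cases l <;> simp_all
    subst this; simp [PySem.Chars.replace.go]
  | succ n ih =>
    intro l acc h
    cases l with
    | nil => simp [PySem.Chars.replace.go]
    | cons x t =>
      simp only [PySem.Chars.replace.go, List.isPrefixOf, Bool.and_true]
      by_cases hx : x = c
      · subst hx
        simp only [beq_self_eq_true, if_pos]
        rw [show List.drop [x].length (x :: t) = t from rfl,
            show [d].reverse ++ acc = d :: acc from rfl]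
        rw [ih t (d :: acc) (by simp at h; omega)]
        simp
      · have hbeq : (c == x) = false := by
          simp only [beq_eq_false_iff_ne, ne_eq]; exact fun hh => hx hh.symm
        rw [hbeq]
        simp only [Bool.false_eq_true, if_false]
        rw [ih t (x :: acc) (by simp at h; omega)]
        simp [hx]

lemma go_and : ∀ (fuel : Nat) (l acc : List Char), l.length ≤ fuel →
    PySem.Chars.replace.go ['a','n','d'] ['&'] fuel l acc = acc.reverse ++ repAnd l := by
  intro fuel
  induction fuel with
  | zero =>
    intro l acc h
    have : l = [] := by cases l <;> simp_all
    subst this; simp [PySem.Chars.replace.go, repAnd]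
  | succ n ih =>
    intro l acc h
    cases l with
    | nil => simp [PySem.Chars.replace.go, repAnd]
    | cons x t =>
      simp only [PySem.Chars.replace.go]
      by_cases hp : List.isPrefixOf ['a','n','d'] (x :: t) = true
      · rw [if_pos hp]
        have hpre : ['a','n','d'] <+: (x :: t) := List.isPrefixOf_iff_prefix.mp hp
        have htake : (x :: t).take 3 = ['a','n','d'] := (List.prefix_iff_eq_take.mp hpre).symm
        have hx : x = 'a' := by simpa using congrArg (fun u => u.head?) htake
        have hlen : 2 ≤ t.length := by
          have := congrArg List.length htake
          simp at this; omega
        rw [show List.drop (['a','n','d'] : List Char).length (x :: t) = t.drop 2 from rfl,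
            show (['&'] : List Char).reverse ++ acc = '&' :: acc from rfl]
        rw [ih (t.drop 2) ('&' :: acc) (by simp at h ⊢; omega)]
        rw [repAnd, if_pos htake]
        simp
      · rw [if_neg hp]
        rw [ih t (x :: acc) (by simp at h; omega)]
        rw [repAnd]
        have htake : ¬ (x :: t).take 3 = ['a','n','d'] := by
          intro htk
          exact hp (List.isPrefixOf_iff_prefix.mpr (List.prefix_iff_eq_take.mpr htk.symm))
        rw [if_neg htake]
        simp

lemma replace_single (l : List Char) (c d : Char) :
    PySem.Chars.replace l [c] [d] = l.map (fun x => if x = c then d else x) := by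
  rw [PySem.Chars.replace]
  simp only [List.isEmpty_cons, Bool.false_eq_true, if_false]
  rw [go_single c d l.length l [] le_rfl]
  simp

lemma replace_and (l : List Char) :
    PySem.Chars.replace l ['a','n','d'] ['&'] = repAnd l := by
  rw [PySem.Chars.replace]
  simp only [List.isEmpty_cons, Bool.false_eq_true, if_false]
  rw [go_and l.length l [] le_rfl]
  simp

lemma gS_eq_n {x : Char} (h : gS x = 'n') : x = 'n' := by
  unfold gS at h; split_ifs at h <;> simp_all
lemma gS_eq_d {x : Char} (h : gS x = 'd') : x = 'd' := by
  unfold gS at h; split_ifs at h <;> simp_all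
lemma gS_eq_a {x : Char} (h : gS x = 'a') : x = 'a' := by
  unfold gS at h; split_ifs at h <;> simp_all

lemma getD_table (c : Char) : cpTable.getD c c = gRest (gS c) := by
  by_cases h1 : c = 's'; · subst h1; decide
  by_cases h2 : c = 'S'; · subst h2; decide
  by_cases h3 : c = 'a'; · subst h3; decide
  by_cases h4 : c = 'A'; · subst h4; decide
  by_cases h5 : c = 'o'; · subst h5; decide
  by_cases h6 : c = 'O'; · subst h6; decide
  by_cases h7 : c = ' '; · subst h7; decide
  have hnone : cpTable.get? c = none := by
    have hmk : cpTable = PySem.Dict.mk [('s','$'), ('S','$'), ('a','@'), ('A','@'), ('o','0'), ('O','0'), (' ','_')] := by decide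
    rw [hmk]
    rw [PySem.Dict.get?_mk_cons, if_neg (by simp only [beq_iff_eq]; exact fun h => h1 h.symm)]
    rw [PySem.Dict.get?_mk_cons, if_neg (by simp only [beq_iff_eq]; exact fun h => h2 h.symm)]
    rw [PySem.Dict.get?_mk_cons, if_neg (by simp only [beq_iff_eq]; exact fun h => h3 h.symm)]
    rw [PySem.Dict.get?_mk_cons, if_neg (by simp only [beq_iff_eq]; exact fun h => h4 h.symm)]
    rw [PySem.Dict.get?_mk_cons, if_neg (by simp only [beq_iff_eq]; exact fun h => h5 h.symm)]
    rw [PySem.Dict.get?_mk_cons, if_neg (by simp only [beq_iff_eq]; exact fun h => h6 h.symm)]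
    rw [PySem.Dict.get?_mk_cons, if_neg (by simp only [beq_iff_eq]; exact fun h => h7 h.symm)]
    rfl
  rw [PySem.Dict.getD, hnone]
  simp [gS, gRest, h1, h2, h3, h4, h5, h6, h7]

lemma main_scan : ∀ (l : List Char), (repAnd (l.map gS)).map gRest = cpScan l := by
  intro l
  induction l using cpScan.induct with
  | case1 => simp [repAnd, cpScan]
  | case2 c t htake ih =>
    have hc : c = 'a' := by simpa using congrArg (fun u => u.head?) htake
    have ht2 : t.take 2 = ['n','d'] := by
      have := htake
      simp [hc, List.take_succ_cons] at this ⊢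
      cases t with
      | nil => simp at this
      | cons y u =>
        cases u with
        | nil => simp at this
        | cons z v => simp_all
    have htl : t = 'n' :: 'd' :: t.drop 2 := by
      conv_lhs => rw [← List.take_append_drop 2 t]
      rw [ht2]; rfl
    rw [cpScan, if_pos htake]
    have hmap : (c :: t).map gS = 'a' :: 'n' :: 'd' :: (t.drop 2).map gS := by
      rw [hc]
      conv_lhs => rw [htl]
      simp [gS]
    rw [hmap, repAnd]
    rw [if_pos (by simp)]
    have ih' : (repAnd ((t.drop 2).map gS)).map gRest = cpScan (t.drop 2) := by
      simpa only [List.drop_succ_cons] using ih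
    rw [show List.drop 2 (('n' : Char) :: ('d' : Char) :: List.map gS (t.drop 2))
          = (t.drop 2).map gS from rfl]
    simp only [List.map_cons, ih']
    rw [show gRest '&' = '&' from by decide]
    simp only [List.drop_succ_cons]
  | case3 c t htake ih =>
    rw [cpScan, if_neg htake]
    have hmap : (c :: t).map gS = gS c :: t.map gS := rfl
    rw [hmap, repAnd]
    have hcond : ¬ (gS c :: t.map gS).take 3 = ['a','n','d'] := by
      intro hh
      apply htake
      have hc : gS c = 'a' := by simpa using congrArg (fun u => u.head?) hh
      have hc' : c = 'a' := gS_eq_a hc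
      have ht : (t.map gS).take 2 = ['n','d'] := by
        simp [List.take_succ_cons] at hh
        exact hh.2
      rw [← List.map_take] at ht
      have ht' : t.take 2 = ['n','d'] := by
        cases h2 : t.take 2 with
        | nil => simp [h2] at ht
        | cons y u =>
          cases u with
          | nil => simp [h2] at ht
          | cons z v =>
            rw [h2] at ht
            simp at ht
            obtain ⟨hy, hz, hv⟩ := ht
            rw [gS_eq_n hy, gS_eq_d hz, hv]
      rw [hc']
      simp [List.take_succ_cons]
      conv_lhs => rw [← List.take_append_drop 2 t, ht']
      simp
    rw [if_neg hcond]
    simp only [List.map_cons]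
    rw [ih, getD_table]

lemma collapse_gS (u : List Char) :
    (u.map (fun x => if x = 's' then '$' else x)).map (fun x => if x = 'S' then '$' else x)
      = u.map gS := by
  rw [List.map_map]
  refine List.map_congr_left (fun x _ => ?_)
  simp only [Function.comp_def, gS]
  split_ifs <;> simp_all

lemma collapse_gRest (u : List Char) :
    (((((u.map (fun x => if x = 'a' then '@' else x)).map
        (fun x => if x = 'A' then '@' else x)).map
        (fun x => if x = 'o' then '0' else x)).map
        (fun x => if x = 'O' then '0' else x)).map
        (fun x => if x = ' ' then '_' else x))
      = u.map gRest := by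
  rw [List.map_map, List.map_map, List.map_map, List.map_map]
  refine List.map_congr_left (fun x _ => ?_)
  simp only [Function.comp_def, gRest]
  split_ifs <;> simp_all

-- ===== VERDICT (by name: the statement is the Claim_ definition above) =====
theorem custom_password_spec : Claim_equal_custom_password := by
  intro password _
  unfold Spec_custom_password custom_password custom_password_alt
  simp only [PySem.Str.replace, String.toList_ofList]
  refine congrArg String.ofList ?_
  rw [show ("s".toList) = ['s'] from rfl, show ("S".toList) = ['S'] from rfl,
      show ("and".toList) = ['a','n','d'] from rfl, show ("&".toList) = ['&'] from rfl,
      show ("a".toList) = ['a'] from rfl, show ("A".toList) = ['A'] from rfl,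
      show ("o".toList) = ['o'] from rfl, show ("O".toList) = ['O'] from rfl,
      show (" ".toList) = [' '] from rfl, show ("_".toList) = ['_'] from rfl,
      show ("$".toList) = ['$'] from rfl, show ("@".toList) = ['@'] from rfl,
      show ("0".toList) = ['0'] from rfl]
  rw [replace_single, replace_single, replace_and, replace_single, replace_single,
      replace_single, replace_single, replace_single]
  rw [collapse_gS, collapse_gRest]
  exact main_scan password.toList
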